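-- pv_equiv track=rewrite | github.com/sawmeraw/run-dna | rexDataCleaner.py | get_goodr_color
-- ===== SOURCE A (Python) =====
-- def get_goodr_color(description: str)->str:
--     arr = description.split(' ')
--     color = ""
--     flag = False
--
--     for word in arr:
--         if flag:
--             color += word.strip().title() + " "
--         if word.lower().strip() == 'sunglasses':
--             flag = True
--
--     return color
-- ===== SOURCE B (Python) =====
-- def get_goodr_color(description: str) -> str:
--     words = description.split(' ')
--     for i, w in enumerate(words):
--         if w.lower().strip() == 'sunglasses':
--             return ''.join(x.strip().title() + ' ' for x in words[i + 1:])
--     return ""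
-- ===== Notes on version B (the rewrite author's own statement) =====
-- stated objective: simpler
-- what changed: Replaces the stateful flag-driven accumulator loop with a locate-then-transform decomposition: find the first 'sunglasses' token, then join the titled remaining tokens.
import Mathlib
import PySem

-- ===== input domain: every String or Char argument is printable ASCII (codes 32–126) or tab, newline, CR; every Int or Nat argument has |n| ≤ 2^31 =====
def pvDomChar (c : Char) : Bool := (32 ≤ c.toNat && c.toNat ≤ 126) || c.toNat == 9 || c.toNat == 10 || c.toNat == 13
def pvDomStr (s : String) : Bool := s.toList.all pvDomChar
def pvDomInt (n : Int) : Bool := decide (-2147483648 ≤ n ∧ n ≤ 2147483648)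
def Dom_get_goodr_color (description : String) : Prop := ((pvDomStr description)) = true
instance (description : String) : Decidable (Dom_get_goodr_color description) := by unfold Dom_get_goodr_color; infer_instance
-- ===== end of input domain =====

-- B replaces A's flag-driven accumulator loop with locate-then-transform (find the first
-- 'sunglasses' token, then join the titled remainder): simpler decomposition, same cost.

-- ===== PORT A =====
-- str.title() for the ASCII domain: first cased (alphabetic) char of each run uppercased,
-- the rest lowercased; exact on printable ASCII (shared by both ports, it IS str.title).
def pyTitle (s : String) : String :=
  String.ofList ((s.toList.foldl (fun (st : List Char × Bool) c =>
    if PySem.Chars.isalpha c then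
      (st.1 ++ [if st.2 then PySem.Chars.lowerChar c else PySem.Chars.upperChar c], true)
    else (st.1 ++ [c], false)) ([], false)).1)

def get_goodr_color (description : String) : String :=
  let arr := (PySem.Str.split? description " ").getD []
  (arr.foldl (fun (st : String × Bool) word =>
      let color := if st.2 then st.1 ++ pyTitle (PySem.Str.strip word) ++ " " else st.1
      let flag := if PySem.Str.strip (PySem.Str.lower word) == "sunglasses" then true else st.2
      (color, flag)) ("", false)).1

-- ===== PORT B =====
def get_goodr_color_alt (description : String) : String :=
  let words := (PySem.Str.split? description " ").getD []
  match words.findIdx? (fun w => PySem.Str.strip (PySem.Str.lower w) == "sunglasses") with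
  | none => ""
  | some i => PySem.Str.join "" ((words.drop (i + 1)).map (fun x => pyTitle (PySem.Str.strip x) ++ " "))

-- ===== PRECONDITION & SPEC =====
def Spec_get_goodr_color (description : String) (out : String) : Prop := out = get_goodr_color_alt description
instance (description : String) (out : String) : Decidable (Spec_get_goodr_color description out) := by unfold Spec_get_goodr_color; infer_instance

-- ===== CLAIM (what is proved, stated in full; the proofs are below) =====
def Claim_equal_get_goodr_color : Prop := ∀ (description : String), Dom_get_goodr_color description → Spec_get_goodr_color description (get_goodr_color description)

-- ===== LEMMAS AND PROOFS =====

-- abbreviations used only by the proofs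
def pvP (w : String) : Bool := PySem.Str.strip (PySem.Str.lower w) == "sunglasses"

def pvG (w : String) : String := pyTitle (PySem.Str.strip w) ++ " "

def pvF (st : String × Bool) (word : String) : String × Bool :=
  let color := if st.2 then st.1 ++ pyTitle (PySem.Str.strip word) ++ " " else st.1
  let flag := if PySem.Str.strip (PySem.Str.lower word) == "sunglasses" then true else st.2
  (color, flag)

theorem pvJoin_nil : PySem.Str.join "" ([] : List String) = "" := by
  apply String.toList_inj.mp
  simp [PySem.Str.toList_join, PySem.Chars.join_nil]

theorem pvJoin_cons (w : String) (ws : List String) :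
    PySem.Str.join "" (w :: ws) = w ++ PySem.Str.join "" ws := by
  apply String.toList_inj.mp
  cases ws with
  | nil => simp [PySem.Str.toList_join, PySem.Chars.join_singleton, PySem.Chars.join_nil]
  | cons b l =>
      simp only [PySem.Str.toList_join, List.map_cons, PySem.Chars.join_cons_cons,
        String.toList_append]
      simp

theorem pvFlagged (ws : List String) (acc : String) :
    ws.foldl pvF (acc, true) = (acc ++ PySem.Str.join "" (ws.map pvG), true) := by
  induction ws generalizing acc with
  | nil => simp [pvJoin_nil]
  | cons w ws ih =>
      simp only [List.foldl_cons, List.map_cons, pvJoin_cons]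
      rw [show pvF (acc, true) w = (acc ++ pvG w, true) by
        simp [pvF, pvG, String.append_assoc]]
      rw [ih, pvG]
      simp [String.append_assoc]

theorem pvUnflagged (ws : List String) (acc : String) :
    (ws.foldl pvF (acc, false)).1 =
      acc ++ (match ws.findIdx? pvP with
              | none => ""
              | some i => PySem.Str.join "" ((ws.drop (i + 1)).map pvG)) := by
  induction ws generalizing acc with
  | nil => simp [List.findIdx?, List.findIdx?.go]
  | cons w ws ih =>
      by_cases hp : pvP w = true
      · have hf : pvF (acc, false) w = (acc, true) := by
          simp [pvF, pvP] at hp ⊢; simp [hp]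
        simp only [List.foldl_cons, hf, pvFlagged, List.findIdx?_cons, hp]
        simp
      · have hf : pvF (acc, false) w = (acc, false) := by
          simp only [pvP] at hp
          simp [pvF, hp]
        simp only [List.foldl_cons, hf, ih, List.findIdx?_cons, hp]
        cases h : ws.findIdx? pvP with
        | none => simp
        | some i => simp [List.drop_succ_cons]

-- ===== VERDICT (by name: the statement is the Claim_ definition above) =====
theorem get_goodr_color_spec : Claim_equal_get_goodr_color := by
  intro d _
  unfold Spec_get_goodr_color get_goodr_color get_goodr_color_alt
  have key := pvUnflagged ((PySem.Str.split? d " ").getD []) ""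
  simp only [show (fun (st : String × Bool) (word : String) =>
      let color := if st.2 then st.1 ++ pyTitle (PySem.Str.strip word) ++ " " else st.1
      let flag := if PySem.Str.strip (PySem.Str.lower word) == "sunglasses" then true else st.2
      (color, flag)) = pvF from rfl]
  rw [key]
  have hpP : pvP = (fun w => PySem.Str.strip (PySem.Str.lower w) == "sunglasses") := rfl
  cases h : ((PySem.Str.split? d " ").getD []).findIdx?
      (fun w => PySem.Str.strip (PySem.Str.lower w) == "sunglasses") with
  | none => simp only [hpP, h]; rfl
  | some i =>
      simp only [hpP, h]
      exact String.empty_append
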